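-- pv_equiv track=rewrite | github.com/pawel-dzialo/spike_detection | spiketest.py | spikeamount
-- ===== SOURCE A (Python) =====
-- def spikeamount(segment, spike_thresh, spike_min, spike_max, samp_freq):
--     sample_count = 0
--     spikes = 0
--     spike_min = spike_min*samp_freq
--     spike_max = spike_max*samp_freq
--     for sample in segment:
--         if sample > spike_thresh:
--             sample_count += 1
--         elif sample_count > spike_min and sample_count < spike_max:
--             spikes += 1
--             sample_count = 0
--         else:
--             sample_count = 0
--     return spikes
-- ===== SOURCE B (Python) =====
-- def spikeamount(segment, spike_thresh, spike_min, spike_max, samp_freq):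
--     lo = spike_min * samp_freq
--     hi = spike_max * samp_freq
--     # Run-length encode the above-threshold predicate ...
--     runs = []
--     for s in segment:
--         above = s > spike_thresh
--         if runs and runs[-1][0] == above:
--             runs[-1][1] += 1
--         else:
--             runs.append([above, 1])
--     # ... and count the completed above-runs whose length is inside the bounds.
--     spikes = 0
--     for i, (above, n) in enumerate(runs):
--         if above and i + 1 < len(runs) and lo < n < hi:
--             spikes += 1
--     return spikes
-- ===== Notes on version B (the rewrite author's own statement) =====
-- stated objective: alternative
-- what changed: Replaces A's single stateful scan (running counter reset on each below-threshold sample) by a two-phase decomposition: run-length encode the above-threshold predicate, then count the completed above-runs whose length lies strictly inside (spike_min*samp_freq, spike_max*samp_freq).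
-- intended difference: When spike_min*samp_freq < 0 < spike_max*samp_freq and the segment has a below-threshold sample at the start or right after another below-threshold sample, A counts each such sample as a spike (its freshly reset counter 0 lies inside the bounds), while B reports only the above-threshold runs; B's value is intended because a below-threshold sample is not a spike. — e.g. on spikeamount([0], 0, -1, 1, 1): A returns 1, B returns 0
import Mathlib
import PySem

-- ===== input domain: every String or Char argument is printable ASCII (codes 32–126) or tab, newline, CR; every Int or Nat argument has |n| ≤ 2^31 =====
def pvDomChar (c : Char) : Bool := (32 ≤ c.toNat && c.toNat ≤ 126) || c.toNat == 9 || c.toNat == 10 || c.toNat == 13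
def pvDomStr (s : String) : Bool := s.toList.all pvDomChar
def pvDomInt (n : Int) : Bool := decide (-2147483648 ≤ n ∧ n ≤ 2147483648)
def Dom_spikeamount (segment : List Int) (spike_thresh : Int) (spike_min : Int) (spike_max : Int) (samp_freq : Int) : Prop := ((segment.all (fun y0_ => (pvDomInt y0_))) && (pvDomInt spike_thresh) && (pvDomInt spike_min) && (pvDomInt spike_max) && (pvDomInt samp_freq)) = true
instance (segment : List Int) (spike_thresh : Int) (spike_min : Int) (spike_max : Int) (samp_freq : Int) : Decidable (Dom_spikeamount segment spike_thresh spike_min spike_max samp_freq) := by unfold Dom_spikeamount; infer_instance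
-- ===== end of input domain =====

-- B replaces A's single stateful scan by a two-phase decomposition (run-length
-- encode the above-threshold predicate, then count the completed in-bounds
-- above-runs); same cost, objective: alternative; on the D_ inputs below A's
-- value differs and B's is the intended one.

-- ===== PORT A =====
def spikeamount (segment : List Int) (spike_thresh : Int) (spike_min : Int) (spike_max : Int) (samp_freq : Int) : Int :=
  let lo := spike_min * samp_freq
  let hi := spike_max * samp_freq
  (segment.foldl (fun (st : Int × Int) sample =>
      if sample > spike_thresh then (st.1 + 1, st.2)
      else if st.1 > lo ∧ st.1 < hi then ((0 : Int), st.2 + 1)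
      else ((0 : Int), st.2)) ((0 : Int), (0 : Int))).2

-- ===== PORT B =====
-- run-length encoding of the predicate (sample > thr), as (isAbove, length) runs
def pvRle (thr : Int) : List Int → List (Bool × Int)
  | [] => []
  | s :: rest =>
    let ab : Bool := decide (s > thr)
    match pvRle thr rest with
    | (a, n) :: rs => if a = ab then (a, n + 1) :: rs else (ab, 1) :: (a, n) :: rs
    | [] => [(ab, 1)]

-- the counting loop over the runs: rest ≠ [] ↔ "i + 1 < len(runs)"
def pvCount (lo hi : Int) : List (Bool × Int) → Int
  | [] => 0
  | (above, n) :: rest =>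
    (if above = true ∧ rest ≠ [] ∧ lo < n ∧ n < hi then (1 : Int) else 0) + pvCount lo hi rest

def spikeamount_alt (segment : List Int) (spike_thresh : Int) (spike_min : Int) (spike_max : Int) (samp_freq : Int) : Int :=
  let lo := spike_min * samp_freq
  let hi := spike_max * samp_freq
  pvCount lo hi (pvRle spike_thresh segment)

-- ===== PRECONDITION & SPEC =====
-- When spike_min*samp_freq < 0 < spike_max*samp_freq and the segment has a below-threshold
-- sample at the start or right after another below-threshold sample, A counts each such
-- sample as a spike (its freshly reset counter 0 lies inside the bounds), while B reports
-- only the above-threshold runs; B's value is intended because a below-threshold sample is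
-- not a spike.
def D_spikeamount (segment : List Int) (spike_thresh : Int) (spike_min : Int) (spike_max : Int) (samp_freq : Int) : Prop :=
  spike_min * samp_freq < 0 ∧ 0 < spike_max * samp_freq ∧
  ((∃ x ∈ segment.take 1, x ≤ spike_thresh) ∨
   (∃ p ∈ segment.zip segment.tail, p.1 ≤ spike_thresh ∧ p.2 ≤ spike_thresh))
instance (segment : List Int) (spike_thresh : Int) (spike_min : Int) (spike_max : Int) (samp_freq : Int) : Decidable (D_spikeamount segment spike_thresh spike_min spike_max samp_freq) := by unfold D_spikeamount; infer_instance

def Spec_spikeamount (segment : List Int) (spike_thresh : Int) (spike_min : Int) (spike_max : Int) (samp_freq : Int) (out : Int) : Prop := ¬ D_spikeamount segment spike_thresh spike_min spike_max samp_freq → out = spikeamount_alt segment spike_thresh spike_min spike_max samp_freq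
instance (segment : List Int) (spike_thresh : Int) (spike_min : Int) (spike_max : Int) (samp_freq : Int) (out : Int) : Decidable (Spec_spikeamount segment spike_thresh spike_min spike_max samp_freq out) := by unfold Spec_spikeamount; infer_instance

def pvDiffWitness_spikeamount : List Int × Int × Int × Int × Int := ([0], 0, -1, 1, 1)
def pvDiffWitnessOut_spikeamount : Int × Int := (1, 0)

-- ===== CLAIM (what is proved, stated in full; the proofs are below) =====
def Claim_unchanged_spikeamount : Prop := ∀ (segment : List Int) (spike_thresh : Int) (spike_min : Int) (spike_max : Int) (samp_freq : Int), Dom_spikeamount segment spike_thresh spike_min spike_max samp_freq → Spec_spikeamount segment spike_thresh spike_min spike_max samp_freq (spikeamount segment spike_thresh spike_min spike_max samp_freq)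
def Claim_changed_spikeamount : Prop := Dom_spikeamount (pvDiffWitness_spikeamount.1) (pvDiffWitness_spikeamount.2.1) (pvDiffWitness_spikeamount.2.2.1) (pvDiffWitness_spikeamount.2.2.2.1) (pvDiffWitness_spikeamount.2.2.2.2) ∧ D_spikeamount (pvDiffWitness_spikeamount.1) (pvDiffWitness_spikeamount.2.1) (pvDiffWitness_spikeamount.2.2.1) (pvDiffWitness_spikeamount.2.2.2.1) (pvDiffWitness_spikeamount.2.2.2.2) ∧ spikeamount (pvDiffWitness_spikeamount.1) (pvDiffWitness_spikeamount.2.1) (pvDiffWitness_spikeamount.2.2.1) (pvDiffWitness_spikeamount.2.2.2.1) (pvDiffWitness_spikeamount.2.2.2.2) = pvDiffWitnessOut_spikeamount.1 ∧ spikeamount_alt (pvDiffWitness_spikeamount.1) (pvDiffWitness_spikeamount.2.1) (pvDiffWitness_spikeamount.2.2.1) (pvDiffWitness_spikeamount.2.2.2.1) (pvDiffWitness_spikeamount.2.2.2.2) = pvDiffWitnessOut_spikeamount.2 ∧ pvDiffWitnessOut_spikeamount.1 ≠ pvDiffWitnessOut_spikeamount.2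
def Claim_exact_spikeamount : Prop := ∀ (segment : List Int) (spike_thresh : Int) (spike_min : Int) (spike_max : Int) (samp_freq : Int), Dom_spikeamount segment spike_thresh spike_min spike_max samp_freq → D_spikeamount segment spike_thresh spike_min spike_max samp_freq → spikeamount segment spike_thresh spike_min spike_max samp_freq ≠ spikeamount_alt segment spike_thresh spike_min spike_max samp_freq

-- ===== LEMMAS AND PROOFS =====

-- A's scan, expressed recursively with the pending run length c
def pvG (thr lo hi c : Int) : List Int → Int
  | [] => 0
  | s :: rest =>
    if s > thr then pvG thr lo hi (c + 1) rest
    else (if lo < c ∧ c < hi then 1 else 0) + pvG thr lo hi 0 rest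

-- A's result re-expressed over the runs (zh = the value A adds per isolated below sample)
def pvCountRuns (lo hi zh : Int) : Bool → List (Bool × Int) → Int
  | _, [] => 0
  | isFirst, (above, len) :: rest =>
    (if above then (if rest ≠ [] ∧ lo < len ∧ len < hi then (1 : Int) else 0)
     else zh * (if isFirst then len else len - 1)) + pvCountRuns lo hi zh false rest

-- B's count of the runs of xs when an above-run of pending length c precedes xs
def pvH (lo hi zh c : Int) : List (Bool × Int) → Int
  | [] => 0
  | (true, n) :: rs =>
    (if rs ≠ [] ∧ lo < c + n ∧ c + n < hi then (1 : Int) else 0) + pvCountRuns lo hi zh false rs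
  | (false, n) :: rs =>
    (if lo < c ∧ c < hi then (1 : Int) else 0) + zh * (n - 1) + pvCountRuns lo hi zh false rs

-- number of isolated-below contributions, read off the runs
def pvZ : Bool → List (Bool × Int) → Int
  | _, [] => 0
  | _, (true, _) :: rs => pvZ false rs
  | b, (false, n) :: rs => (if b then n else n - 1) + pvZ false rs

-- the same count, read off the samples directly (b = "previous sample below, or start")
def pvIso (thr : Int) (b : Bool) : List Int → Int
  | [] => 0
  | x :: xs =>
    (if x ≤ thr ∧ b = true then (1 : Int) else 0) + pvIso thr (decide (x ≤ thr)) xs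

theorem pvRle_cons_ne_nil (thr y : Int) (ys : List Int) : pvRle thr (y :: ys) ≠ [] := by
  cases h : pvRle thr ys with
  | nil => simp [pvRle, h]
  | cons p rs =>
    cases p
    simp only [pvRle, h]
    split <;> simp

theorem pvA_fold (thr lo hi : Int) (xs : List Int) :
    ∀ c sp : Int,
      (xs.foldl (fun (st : Int × Int) sample =>
        if sample > thr then (st.1 + 1, st.2)
        else if st.1 > lo ∧ st.1 < hi then ((0 : Int), st.2 + 1)
        else ((0 : Int), st.2)) (c, sp)).2 = sp + pvG thr lo hi c xs := by
  induction xs with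
  | nil => intro c sp; simp [pvG]
  | cons s rest ih =>
    intro c sp
    by_cases hs : s > thr
    · simp [pvG, hs, ih]
    · by_cases hb : lo < c ∧ c < hi
      · simp [pvG, hs, hb, ih]
        ring
      · simp [pvG, hs, hb, ih]

theorem pvG_rle (thr lo hi zh : Int)
    (hzh : zh = if lo < 0 ∧ 0 < hi then 1 else 0) (xs : List Int) :
    ∀ c : Int, pvG thr lo hi c xs = pvH lo hi zh c (pvRle thr xs) := by
  induction xs with
  | nil => intro c; simp [pvG, pvRle, pvH]
  | cons s rest ih =>
    intro c
    by_cases hs : s > thr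
    · have hab : decide (s > thr) = true := by simp [hs]
      rcases hr : pvRle thr rest with _ | ⟨⟨a, n⟩, rs⟩
      · have hrest : rest = [] := by
          cases rest with
          | nil => rfl
          | cons y ys => exact absurd hr (pvRle_cons_ne_nil thr y ys)
        subst hrest
        simp [pvG, hs, pvRle, pvH, pvCountRuns]
      · cases a with
        | true =>
          simp only [pvG, if_pos hs, ih, hr]
          simp only [pvRle, hab, hr, pvH]
          simp [show c + 1 + n = c + (n + 1) from by ring]
        | false =>
          simp only [pvG, if_pos hs, ih, hr]
          simp [pvRle, hab, hr, pvH, pvCountRuns]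
          ring_nf
    · have hab : decide (s > thr) = false := by simp [hs]
      rcases hr : pvRle thr rest with _ | ⟨⟨a, n⟩, rs⟩
      · have hrest : rest = [] := by
          cases rest with
          | nil => rfl
          | cons y ys => exact absurd hr (pvRle_cons_ne_nil thr y ys)
        subst hrest
        simp [pvG, hs, pvRle, pvH, pvCountRuns]
      · cases a with
        | true =>
          simp only [pvG, if_neg hs, ih, hr]
          simp [pvRle, hab, hr, pvH, pvCountRuns]
        | false =>
          simp only [pvG, if_neg hs, ih, hr]
          simp [pvRle, hab, hr, pvH, hzh]
          by_cases h0 : lo < 0 ∧ 0 < hi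
          · simp [h0]; ring
          · simp [h0]

theorem pvCountRuns_eq_pvH (lo hi zh : Int)
    (hzh : zh = if lo < 0 ∧ 0 < hi then 1 else 0) (runs : List (Bool × Int)) :
    pvCountRuns lo hi zh true runs = pvH lo hi zh 0 runs := by
  rcases runs with _ | ⟨⟨a, n⟩, rs⟩
  · simp [pvCountRuns, pvH]
  · cases a with
    | true => simp [pvCountRuns, pvH]
    | false =>
      simp [pvCountRuns, pvH, hzh]
      by_cases h0 : lo < 0 ∧ 0 < hi <;> simp [h0]

-- split A's run count into B's count plus zh · (number of isolated below samples)
theorem pvCountRuns_split (lo hi zh : Int) (runs : List (Bool × Int)) :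
    ∀ b : Bool, pvCountRuns lo hi zh b runs = pvCount lo hi runs + zh * pvZ b runs := by
  induction runs with
  | nil => intro b; simp [pvCountRuns, pvCount, pvZ]
  | cons p rs ih =>
    intro b
    obtain ⟨a, n⟩ := p
    cases a with
    | true => cases b <;> simp [pvCountRuns, pvCount, pvZ, ih] <;> ring
    | false => cases b <;> simp [pvCountRuns, pvCount, pvZ, ih] <;> ring

-- the run-level count of isolated below samples equals the sample-level one
theorem pvZ_rle (thr : Int) (xs : List Int) :
    (pvZ true (pvRle thr xs) = pvIso thr true xs) ∧
    (pvZ false (pvRle thr xs) = pvIso thr false xs) := by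
  induction xs with
  | nil => simp [pvRle, pvZ, pvIso]
  | cons x xs ih =>
    by_cases hx : x > thr
    · have hab : decide (x > thr) = true := by simp [hx]
      have hle : ¬ x ≤ thr := by omega
      rcases hr : pvRle thr xs with _ | ⟨⟨a, n⟩, rs⟩
      · have hxs : xs = [] := by
          cases xs with
          | nil => rfl
          | cons y ys => exact absurd hr (pvRle_cons_ne_nil thr y ys)
        subst hxs
        simp [pvRle, pvZ, pvIso, hle, hx]
      · cases a with
        | true =>
          have h2 : pvZ false rs = pvIso thr false xs := by
            simpa [pvZ, hr] using ih.2
          simp [pvRle, hab, hr, pvZ, pvIso, hle, h2]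
        | false =>
          have h2 : n - 1 + pvZ false rs = pvIso thr false xs := by
            simpa [pvZ, hr] using ih.2
          simp [pvRle, hab, hr, pvZ, pvIso, hle, h2]
    · have hab : decide (x > thr) = false := by simp [hx]
      have hle : x ≤ thr := by omega
      rcases hr : pvRle thr xs with _ | ⟨⟨a, n⟩, rs⟩
      · have hxs : xs = [] := by
          cases xs with
          | nil => rfl
          | cons y ys => exact absurd hr (pvRle_cons_ne_nil thr y ys)
        subst hxs
        simp [pvRle, pvZ, pvIso, hle, hx]
      · cases a with
        | true =>
          have h1 : pvZ false rs = pvIso thr true xs := by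
            simpa [pvZ, hr] using ih.1
          constructor <;>
            simp [pvRle, hab, hr, pvZ, pvIso, hle, h1]
        | false =>
          have h1 : n + pvZ false rs = pvIso thr true xs := by
            simpa [pvZ, hr] using ih.1
          have h2 : n - 1 + pvZ false rs = pvIso thr false xs := by
            simpa [pvZ, hr] using ih.2
          constructor <;>
          · simp [pvRle, hab, hr, pvZ, pvIso, hle]
            omega

theorem pvIso_nonneg (thr : Int) (xs : List Int) : ∀ b, 0 ≤ pvIso thr b xs := by
  induction xs with
  | nil => intro b; simp [pvIso]
  | cons x xs ih =>
    intro b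
    have h1 := ih true
    have h2 := ih false
    by_cases hx : x ≤ thr <;> by_cases hb : b = true <;>
      simp [pvIso, hx, hb] <;> omega

-- pvIso is positive exactly on the segment condition of D_
theorem pvIso_pos_iff (thr : Int) (xs : List Int) :
    (0 < pvIso thr true xs ↔
      ((∃ x ∈ xs.take 1, x ≤ thr) ∨ (∃ p ∈ xs.zip xs.tail, p.1 ≤ thr ∧ p.2 ≤ thr))) ∧
    (0 < pvIso thr false xs ↔ (∃ p ∈ xs.zip xs.tail, p.1 ≤ thr ∧ p.2 ≤ thr)) := by
  induction xs with
  | nil => simp [pvIso]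
  | cons x xs ih =>
    have hnn := pvIso_nonneg thr xs true
    have hzip : (x :: xs).zip (x :: xs).tail = (xs.take 1).map (fun y => (x, y)) ++ xs.zip xs.tail := by
      cases xs <;> simp
    by_cases hx : x ≤ thr
    · have hd : decide (x ≤ thr) = true := by simp [hx]
      constructor
      · have e : pvIso thr true (x :: xs) = 1 + pvIso thr true xs := by
          simp [pvIso, hx]
        rw [e]
        constructor
        · intro _; exact Or.inl ⟨x, by simp, hx⟩
        · intro _; omega
      · have e : pvIso thr false (x :: xs) = pvIso thr true xs := by
          simp [pvIso, hd]
        rw [e, ih.1, hzip]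
        cases xs with
        | nil => simp
        | cons y ys =>
          simp only [List.take, List.map, List.mem_cons, List.mem_append]
          simp [hx]
          try tauto
    · have hd : decide (x ≤ thr) = false := by simp [hx]
      have e1 : pvIso thr true (x :: xs) = pvIso thr false xs := by
        simp [pvIso, hx]
      have e2 : pvIso thr false (x :: xs) = pvIso thr false xs := by
        simp [pvIso, hx]
      constructor
      · rw [e1, ih.2, hzip]
        cases xs with
        | nil => simp [hx]
        | cons y ys => simp [hx]
      · rw [e2, ih.2, hzip]
        cases xs with
        | nil => simp
        | cons y ys => simp [hx]

-- A's value as B's value plus zh · pvIso, the master identity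
theorem pvA_eq_B_add (segment : List Int) (thr smin smax sf : Int) :
    spikeamount segment thr smin smax sf =
      spikeamount_alt segment thr smin smax sf +
        (if smin * sf < 0 ∧ 0 < smax * sf then (1 : Int) else 0) * pvIso thr true segment := by
  unfold spikeamount spikeamount_alt
  simp only []
  rw [pvA_fold, pvG_rle thr (smin * sf) (smax * sf) _ rfl,
      ← pvCountRuns_eq_pvH _ _ _ rfl, pvCountRuns_split,
      (pvZ_rle thr segment).1]
  ring

-- ===== VERDICT (by name: the statements are the Claim_ definitions above) =====
theorem spikeamount_spec : Claim_unchanged_spikeamount := by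
  intro segment thr smin smax sf _
  intro hnd
  rw [pvA_eq_B_add]
  by_cases hz : smin * sf < 0 ∧ 0 < smax * sf
  · have hcond : ¬ ((∃ x ∈ segment.take 1, x ≤ thr) ∨
        (∃ p ∈ segment.zip segment.tail, p.1 ≤ thr ∧ p.2 ≤ thr)) := by
      intro hc
      exact hnd ⟨hz.1, hz.2, hc⟩
    have hpos := (pvIso_pos_iff thr segment).1
    have hnn := pvIso_nonneg thr segment true
    have h0 : pvIso thr true segment = 0 := by
      rcases lt_or_eq_of_le hnn with h | h
      · exact absurd (hpos.mp h) hcond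
      · omega
    simp [h0]
  · simp [hz]

theorem spikeamount_changed : Claim_changed_spikeamount := by
  unfold Claim_changed_spikeamount; decide

theorem spikeamount_tight : Claim_exact_spikeamount := by
  intro segment thr smin smax sf _ hd
  obtain ⟨h1, h2, hc⟩ := hd
  have hpos : 0 < pvIso thr true segment := (pvIso_pos_iff thr segment).1.mpr hc
  rw [pvA_eq_B_add]
  simp [h1, h2]
  omega
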